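-- pv_equiv track=rewrite | github.com/PabloLION/classical-encoding | classical_encoding/r_ans.py | decode_from_int
-- ===== SOURCE A (Python) =====
-- from bisect import bisect_right
-- from itertools import accumulate
--
-- Index = int  # size_t
--
-- Pos = int  # real int, the position of the symbol in the distribution
--
-- def find_symbol_idx_pos_by_r(r: int, dist: tuple[int, ...]) -> tuple[Index, Pos]:
--     ps = tuple(accumulate(dist))  # prefix sum
--     if r > ps[-1]:  #  ps[-1] == sum(dist)
--         raise ValueError("r is too large")
--     idx = bisect_right(ps, r)
--     pos = r - (ps[idx - 1] if idx else 0)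
--     return idx, pos
--
-- def decode_from_int(
--     encoded: int, dist: tuple[int, ...], message_length: int
-- ) -> list[Index]:
--     """decode a list of symbols from an integer and the distribution"""
--     symbols = [0] * message_length  # the decoded symbols
--     x = encoded
--     for i in range(message_length):
--         m = sum(dist)  # M in the article
--         d, r = divmod(x, m)
--         idx_sym, pos_sym = find_symbol_idx_pos_by_r(r, dist)
--         x = d * dist[idx_sym] + pos_sym
--         symbols[~i] = idx_sym
--     return symbols
-- ===== SOURCE B (Python) =====
-- def decode_from_int(encoded, dist, message_length):
--     """decode a list of symbols from an integer and the distribution"""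
--     total = sum(dist)
--     out = []
--     x = encoded
--     for _ in range(message_length):
--         d, r = divmod(x, total)
--         idx = 0
--         while r >= dist[idx]:
--             r -= dist[idx]
--             idx += 1
--         x = d * dist[idx] + r
--         out.append(idx)
--     out.reverse()
--     return out
-- ===== Notes on version B (the rewrite author's own statement) =====
-- stated objective: alternative
-- what changed: B replaces A's per-iteration prefix-sum construction plus binary search (accumulate + bisect_right) by a direct sequential subtraction scan over the raw frequencies (no prefix sums, no bisect), computes sum(dist) once, and builds the output by append-then-reverse instead of filling a preallocated list back-to-front.
-- outside the precondition, e.g. on decode_from_int(7, (5, -2, 1), 1): A returns [2], B returns [0]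
import Mathlib
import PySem

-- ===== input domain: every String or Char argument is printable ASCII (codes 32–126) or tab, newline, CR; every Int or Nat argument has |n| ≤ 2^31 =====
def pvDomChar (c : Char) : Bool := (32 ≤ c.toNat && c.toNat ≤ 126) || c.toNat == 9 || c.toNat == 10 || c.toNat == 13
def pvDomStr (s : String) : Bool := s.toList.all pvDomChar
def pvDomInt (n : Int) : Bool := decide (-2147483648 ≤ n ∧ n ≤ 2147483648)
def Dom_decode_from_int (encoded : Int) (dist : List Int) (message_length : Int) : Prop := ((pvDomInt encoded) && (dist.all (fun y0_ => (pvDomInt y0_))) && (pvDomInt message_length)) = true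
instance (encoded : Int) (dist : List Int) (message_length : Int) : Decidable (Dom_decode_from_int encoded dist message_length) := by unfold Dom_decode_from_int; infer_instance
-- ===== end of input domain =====

-- B replaces the per-iteration prefix sums + binary search (accumulate + bisect_right) by a direct
-- sequential subtraction scan over the raw frequencies and appends+reverses the output;
-- equality of the return values is proved on Pre_ (nonnegative frequencies with positive sum).

-- ===== PORT A =====
-- itertools.accumulate (running prefix sums), used by A only
def pyAccumGo (acc : Int) : List Int → List Int
  | [] => []
  | d :: t => (acc + d) :: pyAccumGo (acc + d) t

def pyAccum (l : List Int) : List Int := pyAccumGo 0 l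

-- bisect.bisect_right, the exact binary search of CPython's bisect (used by A only)
def bisectGo (a : List Int) (x : Int) (lo hi : Nat) : Nat :=
  if _h : lo < hi then
    let mid := (lo + hi) / 2
    if x < a.getD mid 0 then bisectGo a x lo mid else bisectGo a x (mid + 1) hi
  else lo
termination_by hi - lo
decreasing_by all_goals omega

def bisectRight (a : List Int) (x : Int) : Nat := bisectGo a x 0 a.length

-- find_symbol_idx_pos_by_r; the 'r > ps[-1]' ValueError never fires on Pre_ (r < sum(dist) = ps[-1]),
-- outside Pre_ Python raises and the port's value is unconstrained
def find_symbol_idx_pos_by_r (r : Int) (dist : List Int) : Nat × Int :=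
  let ps := pyAccum dist
  let idx := bisectRight ps r
  let pos := r - (if idx ≠ 0 then ps.getD (idx - 1) 0 else 0)
  (idx, pos)

def decode_from_int (encoded : Int) (dist : List Int) (message_length : Int) : List Int :=
  let L := message_length.toNat          -- [0]*L and range(L) are empty for L ≤ 0
  let init : List Int := List.replicate L 0
  let res := (List.range L).foldl (fun (st : List Int × Int) i =>
      let m := dist.sum                  -- sum(dist), recomputed every iteration as in A
      let d := PySem.Int.floordiv st.2 m -- divmod; m = 0 (outside Pre_) raises in Python
      let r := PySem.Int.mod st.2 m
      let sp := find_symbol_idx_pos_by_r r dist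
      (st.1.set (L - 1 - i) (sp.1 : Int),      -- symbols[~i] = idx_sym
       d * dist.getD sp.1 0 + sp.2)) (init, encoded)
  res.1

-- ===== PORT B =====
-- the 'while r >= dist[idx]: r -= dist[idx]; idx += 1' subtraction scan, as structural recursion;
-- Python raises IndexError when the scan runs off the end (impossible on Pre_), there the port
-- returns the leftover state (unconstrained outside Pre_)
def pvScan (r : Int) : List Int → Nat × Int
  | [] => (0, r)
  | f :: t =>
    if f ≤ r then
      let p := pvScan (r - f) t
      (p.1 + 1, p.2)
    else (0, r)

def decode_from_int_alt (encoded : Int) (dist : List Int) (message_length : Int) : List Int :=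
  let total := dist.sum                  -- sum(dist), computed once
  let res := (List.range message_length.toNat).foldl (fun (st : List Int × Int) _ =>
      let d := PySem.Int.floordiv st.2 total
      let r := PySem.Int.mod st.2 total
      let p := pvScan r dist
      (st.1 ++ [(p.1 : Int)], d * dist.getD p.1 0 + p.2)) ([], encoded)
  res.1.reverse

-- ===== PRECONDITION & SPEC =====
-- Pre_ restricts to the natural domain of a frequency distribution: with message_length ≥ 1,
-- sum(dist) ≤ 0 makes A raise (ZeroDivisionError / ValueError), and a negative frequency makes
-- A's bisect_right run on an unsorted prefix-sum list, returning an accidental index (B's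
-- subtraction scan raises IndexError or returns the intended leftmost fit there).
def Pre_decode_from_int (encoded : Int) (dist : List Int) (message_length : Int) : Prop :=
  message_length ≤ 0 ∨ (0 < dist.sum ∧ ∀ f ∈ dist, 0 ≤ f)

instance (encoded : Int) (dist : List Int) (message_length : Int) : Decidable (Pre_decode_from_int encoded dist message_length) := by unfold Pre_decode_from_int; infer_instance

def pvWitness_decode_from_int : Int × List Int × Int := (1869, [3, 1, 4], 5)

def Spec_decode_from_int (encoded : Int) (dist : List Int) (message_length : Int) (out : List Int) : Prop := out = decode_from_int_alt encoded dist message_length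
instance (encoded : Int) (dist : List Int) (message_length : Int) (out : List Int) : Decidable (Spec_decode_from_int encoded dist message_length out) := by unfold Spec_decode_from_int; infer_instance

-- ===== CLAIM (what is proved, stated in full; the proofs are below) =====
def Claim_equal_decode_from_int : Prop := ∀ (encoded : Int) (dist : List Int) (message_length : Int), Dom_decode_from_int encoded dist message_length → Pre_decode_from_int encoded dist message_length → Spec_decode_from_int encoded dist message_length (decode_from_int encoded dist message_length)

-- ===== LEMMAS AND PROOFS =====

theorem pyAccumGo_length (acc : Int) (l : List Int) : (pyAccumGo acc l).length = l.length := by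
  induction l generalizing acc with
  | nil => rfl
  | cons f t ih => simp [pyAccumGo, ih]

theorem pyAccumGo_shift (l : List Int) (a b : Int) :
    pyAccumGo (a + b) l = (pyAccumGo b l).map (a + ·) := by
  induction l generalizing b with
  | nil => rfl
  | cons f t ih =>
    simp only [pyAccumGo, List.map_cons]
    rw [show a + b + f = a + (b + f) by ring, ih (b + f)]

theorem pyAccum_cons (f : Int) (t : List Int) :
    pyAccum (f :: t) = f :: (pyAccum t).map (f + ·) := by
  simp only [pyAccum, pyAccumGo, zero_add]
  rw [show f = f + 0 by ring, pyAccumGo_shift]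
  simp

theorem pyAccum_nonneg (l : List Int) (h : ∀ f ∈ l, 0 ≤ f) :
    ∀ v ∈ pyAccum l, 0 ≤ v := by
  induction l with
  | nil => simp [pyAccum, pyAccumGo]
  | cons f t ih =>
    intro v hv
    rw [pyAccum_cons, List.mem_cons] at hv
    rcases hv with rfl | hv
    · exact h v (by simp)
    · obtain ⟨w, hw, hwv⟩ := List.mem_map.mp hv
      have := ih (fun g hg => h g (by simp [hg])) w hw
      have hf := h f (by simp)
      omega

-- binary-search characterisation: if a splits at k (≤ x before, > x from k on), bisectGo finds k
theorem bisectGo_eq (a : List Int) (x : Int) :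
    ∀ n lo hi k, hi - lo = n → lo ≤ k → k ≤ hi →
    (∀ j, lo ≤ j → j < k → a.getD j 0 ≤ x) →
    (∀ j, k ≤ j → j < hi → x < a.getD j 0) →
    bisectGo a x lo hi = k := by
  intro n
  induction n using Nat.strong_induction_on with
  | _ n ih =>
    intro lo hi k hn h1 h2 hle hgt
    by_cases h : lo < hi
    · rw [bisectGo]
      simp only [h, dif_pos]
      set mid := (lo + hi) / 2 with hmid
      have hm1 : lo ≤ mid := by omega
      have hm2 : mid < hi := by omega
      by_cases hx : x < a.getD mid 0
      · simp only [hx, if_pos]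
        have hkm : k ≤ mid := by
          by_contra hc
          exact absurd hx (not_lt.mpr (hle mid hm1 (by omega)))
        exact ih (mid - lo) (by omega) lo mid k rfl h1 hkm hle
          (fun j hj1 hj2 => hgt j hj1 (by omega))
      · simp only [hx, if_neg]
        have hkm : mid < k := by
          by_contra hc
          exact hx (hgt mid (by omega) hm2)
        exact ih (hi - (mid + 1)) (by omega) (mid + 1) hi k rfl (by omega) h2
          (fun j hj1 hj2 => hle j (by omega) hj2) hgt
    · rw [bisectGo]
      simp only [h, dif_neg, not_false_iff]
      omega

-- the subtraction scan's result, characterised against A's prefix sums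
theorem pvScan_spec (dist : List Int) (hnn : ∀ f ∈ dist, 0 ≤ f) :
    ∀ r : Int, 0 ≤ r → r < dist.sum →
    (pvScan r dist).1 < dist.length ∧
    (∀ j, j < (pvScan r dist).1 → (pyAccum dist).getD j 0 ≤ r) ∧
    (∀ j, (pvScan r dist).1 ≤ j → j < dist.length → r < (pyAccum dist).getD j 0) ∧
    (pvScan r dist).2 =
      r - (if (pvScan r dist).1 ≠ 0 then (pyAccum dist).getD ((pvScan r dist).1 - 1) 0 else 0) := by
  induction dist with
  | nil => intro r h0 hlt; simp at hlt; omega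
  | cons f t ih =>
    intro r h0 hlt
    have hf : 0 ≤ f := hnn f (by simp)
    have hps : pyAccum (f :: t) = f :: (pyAccum t).map (f + ·) := pyAccum_cons f t
    have hlen : (pyAccum t).length = t.length := by simp [pyAccum, pyAccumGo_length]
    by_cases hge : f ≤ r
    · have ht := ih (fun g hg => hnn g (by simp [hg])) (r - f)
        (by omega) (by simp [List.sum_cons] at hlt; omega)
      obtain ⟨hi1, hi2, hi3, hi4⟩ := ht
      simp only [pvScan, hge, if_pos]
      refine ⟨by simpa using hi1, ?_, ?_, ?_⟩
      · intro j hj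
        rcases j with _ | j'
        · simp [hps]; omega
        · have := hi2 j' (by omega)
          rw [hps]
          have hj' : j' < (pyAccum t).length := by omega
          simp only [List.getD_cons_succ]
          rw [List.getD_eq_getElem _ _ (by simpa using hj'), List.getElem_map]
          rw [List.getD_eq_getElem _ _ hj'] at this
          omega
      · intro j hj1 hj2
        rcases j with _ | j'
        · omega
        · have := hi3 j' (by omega) (by simp at hj2; omega)
          rw [hps]
          have hj' : j' < (pyAccum t).length := by simp at hj2; omega
          simp only [List.getD_cons_succ]
          rw [List.getD_eq_getElem _ _ (by simpa using hj'), List.getElem_map]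
          rw [List.getD_eq_getElem _ _ hj'] at this
          omega
      · rcases hsc : (pvScan (r - f) t).1 with _ | i'
        · rw [hsc] at hi4
          simp only [hsc, hps]
          simp at hi4 ⊢
          omega
        · rw [hsc] at hi4
          simp only [hsc, hps]
          have hi'lt : i' < (pyAccum t).length := by
            have := hi1; rw [hsc] at this; omega
          simp only [ne_eq, Nat.succ_ne_zero, not_false_iff, if_pos, Nat.add_sub_cancel,
            List.getD_cons_succ] at hi4 ⊢
          rw [List.getD_eq_getElem _ _ (by simpa using hi'lt), List.getElem_map]
          rw [List.getD_eq_getElem _ _ hi'lt] at hi4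
          omega
    · simp only [pvScan, hge, if_neg, not_false_iff]
      refine ⟨by simp, by omega, ?_, by simp⟩
      intro j _ hj2
      rcases j with _ | j'
      · simp [hps]; omega
      · rw [hps]
        have hj' : j' < (pyAccum t).length := by simp at hj2; omega
        simp only [List.getD_cons_succ]
        rw [List.getD_eq_getElem _ _ (by simpa using hj'), List.getElem_map]
        have := pyAccum_nonneg t (fun g hg => hnn g (by simp [hg])) ((pyAccum t)[j'])
          (List.getElem_mem _)
        omega

-- on Pre_, A's per-step symbol search equals B's subtraction scan
theorem step_eq (dist : List Int) (hnn : ∀ f ∈ dist, 0 ≤ f) (hs : 0 < dist.sum)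
    (r : Int) (h0 : 0 ≤ r) (hlt : r < dist.sum) :
    find_symbol_idx_pos_by_r r dist = pvScan r dist := by
  obtain ⟨h1, h2, h3, h4⟩ := pvScan_spec dist hnn r h0 hlt
  have hlen : (pyAccum dist).length = dist.length := by simp [pyAccum, pyAccumGo_length]
  have hb : bisectRight (pyAccum dist) r = (pvScan r dist).1 := by
    unfold bisectRight
    exact bisectGo_eq (pyAccum dist) r ((pyAccum dist).length - 0) 0 (pyAccum dist).length
      (pvScan r dist).1 rfl (Nat.zero_le _) (by omega)
      (fun j _ hj => h2 j hj) (fun j hj1 hj2 => h3 j hj1 (by omega))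
  refine Prod.ext ?_ ?_ <;> simp only [find_symbol_idx_pos_by_r, hb]
  · rw [h4]

-- the common per-iteration step on Pre_: emitted symbol and next x (phrased via A's search)
def pvStep (dist : List Int) (x : Int) : Nat × Int :=
  let m := dist.sum
  let d := PySem.Int.floordiv x m
  let r := PySem.Int.mod x m
  let sp := find_symbol_idx_pos_by_r r dist
  (sp.1, d * dist.getD sp.1 0 + sp.2)

def pvIter (dist : List Int) (x : Int) : Nat → Int
  | 0 => x
  | k + 1 => (pvStep dist (pvIter dist x k)).2

def pvEmits (dist : List Int) (x : Int) : Nat → List Int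
  | 0 => []
  | k + 1 => pvEmits dist x k ++ [((pvStep dist (pvIter dist x k)).1 : Int)]

theorem set_replicate_cons (n : Nat) (t : List Int) (v : Int) :
    (List.replicate n (0 : Int) ++ 0 :: t).set n v = List.replicate n 0 ++ v :: t := by
  induction n generalizing t with
  | zero => simp
  | succ k ih => simpa [List.replicate_succ] using ih t

theorem A_fold (dist : List Int) (x : Int) (L : Nat) :
    ∀ k, k ≤ L →
    (List.range k).foldl (fun (st : List Int × Int) i =>
      let m := dist.sum
      let d := PySem.Int.floordiv st.2 m
      let r := PySem.Int.mod st.2 m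
      let sp := find_symbol_idx_pos_by_r r dist
      (st.1.set (L - 1 - i) (sp.1 : Int), d * dist.getD sp.1 0 + sp.2))
      (List.replicate L 0, x)
    = (List.replicate (L - k) 0 ++ (pvEmits dist x k).reverse, pvIter dist x k) := by
  intro k hk
  induction k with
  | zero => simp [pvEmits, pvIter]
  | succ k ih =>
    rw [List.range_succ, List.foldl_append, ih (by omega), List.foldl_cons, List.foldl_nil]
    have hrep : List.replicate (L - k) (0 : Int)
        = List.replicate (L - (k + 1)) 0 ++ [0] := by
      have : L - k = (L - (k + 1)) + 1 := by omega
      rw [this, List.replicate_succ']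
    have hidx : L - 1 - k = L - (k + 1) := by omega
    simp only [pvEmits, pvIter, pvStep, hrep, hidx, List.append_assoc, List.cons_append,
      List.nil_append, List.reverse_append, List.reverse_cons, List.reverse_nil]
    refine Prod.ext ?_ rfl
    simp [set_replicate_cons (L - (k + 1)) (pvEmits dist x k).reverse]

theorem B_fold (dist : List Int) (x : Int) (hnn : ∀ f ∈ dist, 0 ≤ f) (hs : 0 < dist.sum) (k : Nat) :
    (List.range k).foldl (fun (st : List Int × Int) _ =>
      let d := PySem.Int.floordiv st.2 dist.sum
      let r := PySem.Int.mod st.2 dist.sum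
      let p := pvScan r dist
      (st.1 ++ [(p.1 : Int)], d * dist.getD p.1 0 + p.2)) ([], x)
    = ((pvEmits dist x k), pvIter dist x k) := by
  induction k with
  | zero => simp [pvEmits, pvIter]
  | succ k ih =>
    rw [List.range_succ, List.foldl_append, ih, List.foldl_cons, List.foldl_nil]
    have hmod0 : 0 ≤ PySem.Int.mod (pvIter dist x k) dist.sum := PySem.Int.mod_nonneg _ hs
    have hmodlt : PySem.Int.mod (pvIter dist x k) dist.sum < dist.sum := PySem.Int.mod_lt _ hs
    have hst := step_eq dist hnn hs _ hmod0 hmodlt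
    simp only [pvEmits, pvIter, pvStep, hst]

-- ===== VERDICT (by name: the statement is the Claim_ definition above) =====
theorem decode_from_int_spec : Claim_equal_decode_from_int := by
  intro encoded dist message_length _hdom hpre
  unfold Spec_decode_from_int decode_from_int decode_from_int_alt
  dsimp only
  by_cases hL : message_length ≤ 0
  · have : message_length.toNat = 0 := by omega
    simp [this]
  · have hs : 0 < dist.sum := by
      rcases hpre with h | h
      · exact absurd h hL
      · exact h.1
    have hnn : ∀ f ∈ dist, 0 ≤ f := by
      rcases hpre with h | h
      · exact absurd h hL
      · exact h.2
    rw [A_fold dist encoded message_length.toNat message_length.toNat (le_refl _),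
        B_fold dist encoded hnn hs]
    simp
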